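-- pv_equiv track=rewrite | github.com/Dememedp/pet31 | Task31/Task31.py | in_two
-- ===== SOURCE A (Python) =====
-- import string
--
-- alphabet = string.ascii_lowercase
--
-- def in_two(array):
--     count = 0
--     i = 0
--     arrayofchar = list()
--     lenlen = len(array)
--     for letter in alphabet:
--         while i < lenlen:
--             for let in array[i]:
--                 if let == letter:
--                     count +=1
--                     break
--             i +=1
--         if count >= 2:
--             arrayofchar.append(letter)
--         count = 0
--         i = 0
--     return arrayofchar
-- ===== SOURCE B (Python) =====
-- import string
--
-- def in_two(array):
--     counts = {}
--     for word in array: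
--         for ch in set(word):
--             counts[ch] = counts.get(ch, 0) + 1
--     return [letter for letter in string.ascii_lowercase if counts.get(letter, 0) >= 2]
-- ===== Notes on version B (the rewrite author's own statement) =====
-- stated objective: faster
-- what changed: Instead of scanning the whole array once per alphabet letter (26 passes), B makes a single pass over the array building a dict that counts, via per-word sets, how many elements contain each character, then filters the alphabet against it.
import Mathlib
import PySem

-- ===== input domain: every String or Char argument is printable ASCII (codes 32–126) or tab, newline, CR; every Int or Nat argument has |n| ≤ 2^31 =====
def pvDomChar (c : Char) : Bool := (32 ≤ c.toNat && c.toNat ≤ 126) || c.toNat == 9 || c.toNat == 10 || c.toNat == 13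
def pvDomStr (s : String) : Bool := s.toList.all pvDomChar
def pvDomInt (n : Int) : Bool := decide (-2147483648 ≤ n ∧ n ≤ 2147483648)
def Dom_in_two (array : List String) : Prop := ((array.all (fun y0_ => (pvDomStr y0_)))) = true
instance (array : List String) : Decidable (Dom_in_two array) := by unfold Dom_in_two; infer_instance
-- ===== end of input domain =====

-- B replaces A's 26 full scans of the array by one pass building a per-character count of
-- containing elements (via per-word sets), then a single alphabet filter; objective: faster.


-- the module constant `alphabet = string.ascii_lowercase`, shared by both Pythons
def pvAlphabet : List Char := "abcdefghijklmnopqrstuvwxyz".toList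

-- ===== PORT A =====
-- A's inner `for let in array[i]: if let == letter: count += 1; break`
def inTwoScan (letter : Char) (cs : List Char) (count : Int) : Int :=
  match cs with
  | [] => count
  | c :: rest => if c = letter then count + 1 else inTwoScan letter rest count

def in_two (array : List String) : List String :=
  -- A's while loop walks i = 0 .. len(array)-1 reading array[i]: a left fold over array
  pvAlphabet.foldl (fun arrayofchar letter =>
    let count : Int := array.foldl (fun count s => inTwoScan letter s.toList count) 0
    if count ≥ 2 then arrayofchar ++ [String.mk [letter]] else arrayofchar) []

-- ===== PORT B =====
def inTwoCounts (array : List String) : PySem.Dict Char Int :=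
  array.foldl (fun counts word =>
    (PySem.Set.ofList word.toList).foldl
      (fun counts ch => counts.insert ch (counts.getD ch 0 + 1)) counts)
    PySem.Dict.empty

def in_two_alt (array : List String) : List String :=
  let counts := inTwoCounts array
  (pvAlphabet.filter (fun letter => decide (counts.getD letter 0 ≥ 2))).map
    (fun letter => String.mk [letter])

-- ===== PRECONDITION & SPEC =====
def Spec_in_two (array : List String) (out : List String) : Prop := out = in_two_alt array
instance (array : List String) (out : List String) : Decidable (Spec_in_two array out) := by unfold Spec_in_two; infer_instance

-- ===== CLAIM (what is proved, stated in full; the proofs are below) =====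
def Claim_equal_in_two : Prop := ∀ (array : List String), Dom_in_two array → Spec_in_two array (in_two array)

-- ===== LEMMAS AND PROOFS =====

-- A's inner scan adds 1 exactly when the letter occurs in the word
theorem inTwoScan_eq (letter : Char) (cs : List Char) (count : Int) :
    inTwoScan letter cs count = if letter ∈ cs then count + 1 else count := by
  induction cs with
  | nil => simp [inTwoScan]
  | cons c rest ih =>
    by_cases h : c = letter
    · simp [inTwoScan, h]
    · simp [inTwoScan, h, ih, Ne.symm h]

-- A's per-letter count is the number of array elements containing the letter
theorem in_two_count_eq (letter : Char) (array : List String) (n : Int) :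
    array.foldl (fun count s => inTwoScan letter s.toList count) n
      = n + (array.countP (fun s => decide (letter ∈ s.toList)) : Int) := by
  induction array generalizing n with
  | nil => simp
  | cons s rest ih =>
    rw [List.foldl_cons, ih, inTwoScan_eq, List.countP_cons]
    by_cases h : letter ∈ s.toList <;> simp [h] <;> push_cast <;> ring

-- B's dict entry is the same count
theorem inTwoCounts_getD (letter : Char) (array : List String) :
    ∀ d : PySem.Dict Char Int,
      (array.foldl (fun counts word =>
          (PySem.Set.ofList word.toList).foldl
            (fun counts ch => counts.insert ch (counts.getD ch 0 + 1)) counts) d).getD letter 0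
        = d.getD letter 0 + (array.countP (fun s => decide (letter ∈ s.toList)) : Int) := by
  induction array with
  | nil => simp
  | cons s rest ih =>
    intro d
    simp only [List.foldl_cons, ih, PySem.Dict.getD_foldl_insert_add_one, List.countP_cons]
    by_cases h : letter ∈ s.toList
    · rw [List.count_eq_one_of_mem (PySem.Set.nodup_ofList s.toList)
          ((PySem.Set.mem_ofList s.toList letter).mpr h)]
      simp [h]; push_cast; ring
    · rw [List.count_eq_zero_of_not_mem
          (fun hm => h ((PySem.Set.mem_ofList s.toList letter).mp hm))]
      simp [h]

-- A's fold over the letters, for any letter list and accumulator, equals B's filter-map shape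
theorem in_two_fold_eq (array : List String) (l : List Char) (acc : List String) :
    l.foldl (fun arrayofchar letter =>
        let count : Int := array.foldl (fun count s => inTwoScan letter s.toList count) 0
        if count ≥ 2 then arrayofchar ++ [String.mk [letter]] else arrayofchar) acc
      = acc ++ (l.filter (fun letter => decide ((inTwoCounts array).getD letter 0 ≥ 2))).map
          (fun letter => String.mk [letter]) := by
  induction l generalizing acc with
  | nil => simp
  | cons c rest ih =>
    have hc : (inTwoCounts array).getD c 0
        = (array.countP (fun s => decide (c ∈ s.toList)) : Int) := by
      simpa using inTwoCounts_getD c array PySem.Dict.empty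
    rw [List.foldl_cons, ih, List.filter_cons]
    simp only [in_two_count_eq, zero_add, hc]
    by_cases h : (array.countP (fun s => decide (c ∈ s.toList)) : Int) ≥ 2
    · simp [h]
    · simp [h]

-- ===== VERDICT (by name: the statement is the Claim_ definition above) =====
theorem in_two_spec : Claim_equal_in_two := by
  intro array _
  unfold Spec_in_two in_two in_two_alt
  simpa using in_two_fold_eq array pvAlphabet []
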